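-- pv_equiv track=rewrite | github.com/JadielTeofilo/General-Algorithms | src/interviewbit/greedy/distribute_candy.py | build_suffix
-- ===== SOURCE A (Python) =====
-- from typing import List
--
-- def build_suffix(children: List[int]) -> List[int]:
-- 	""" Builds suffix cache that says the num of
-- 		consecutive desc elements to the right
-- 	"""
-- 	suffix: List[int] = [0] * len(children)
-- 	for i in range(len(children) - 2,  -1, -1):
-- 		if children[i] > children[i + 1]:
-- 			suffix[i] = suffix[i + 1] + 1
-- 		elif children[i] == children[i + 1]:
-- 			suffix[i] = suffix[i + 1]
-- 	return suffix
-- ===== SOURCE B (Python) =====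
-- from typing import List
--
-- def build_suffix(children: List[int]) -> List[int]:
--     """Same values, computed per-index: for each i rescan the
--     non-increasing run to the right, counting strict descents."""
--     n = len(children)
--     out: List[int] = []
--     for i in range(n):
--         cnt = 0
--         j = i
--         while j < n - 1 and children[j] >= children[j + 1]:
--             if children[j] > children[j + 1]:
--                 cnt += 1
--             j += 1
--         out.append(cnt)
--     return out
-- ===== Notes on version B (the rewrite author's own statement) =====
-- stated objective: alternative
-- what changed: Replaces the right-to-left DP that reuses suffix[i+1] with an independent per-index forward rescan of the non-increasing run, counting strict descents until the first ascent.
import Mathlib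
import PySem

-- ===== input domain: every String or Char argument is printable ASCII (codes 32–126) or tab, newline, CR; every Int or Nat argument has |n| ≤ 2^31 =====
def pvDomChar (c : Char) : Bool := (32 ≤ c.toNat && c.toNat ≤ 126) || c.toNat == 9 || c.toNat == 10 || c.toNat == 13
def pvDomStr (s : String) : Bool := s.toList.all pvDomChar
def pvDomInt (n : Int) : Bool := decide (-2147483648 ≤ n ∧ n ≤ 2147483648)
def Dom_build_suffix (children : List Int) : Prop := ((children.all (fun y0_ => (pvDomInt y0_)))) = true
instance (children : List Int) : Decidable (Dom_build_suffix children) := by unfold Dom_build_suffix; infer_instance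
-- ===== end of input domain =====

-- B replaces A's right-to-left DP (suffix[i] from suffix[i+1]) by an independent per-index
-- forward rescan of the non-increasing run; alternative decomposition, not faster.

-- ===== PORT A =====
-- loop body: both reads children[i], children[i+1] and the write suffix[i] are always in
-- range over range(len-2, -1, -1), so pyGetD with default 0 and List.set are exact here
def build_suffix (children : List Int) : List Int :=
  (PySem.List.pyRange ((children.length : Int) - 2) (-1) (-1)).foldl (fun s i =>
    if PySem.List.pyGetD children i 0 > PySem.List.pyGetD children (i + 1) 0 then
      s.set i.toNat (PySem.List.pyGetD s (i + 1) 0 + 1)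
    else if PySem.List.pyGetD children i 0 = PySem.List.pyGetD children (i + 1) 0 then
      s.set i.toNat (PySem.List.pyGetD s (i + 1) 0)
    else s) (List.replicate children.length (0 : Int))

-- ===== PORT B =====
-- Source B's inner while loop over index j: the pair (children[j], children[j+1]) is the head
-- pair of the remaining suffix children[j:], which this recursion walks; cnt is the accumulator
def pvRun : Int → List Int → Int
  | cnt, a :: b :: rest =>
      if a ≥ b then pvRun (if a > b then cnt + 1 else cnt) (b :: rest) else cnt
  | cnt, _ => cnt

def build_suffix_alt (children : List Int) : List Int :=
  (PySem.List.pyRange 0 (children.length : Int) 1).map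
    (fun i => pvRun 0 (PySem.List.slice children (some i) none))

-- ===== PRECONDITION & SPEC =====
def Spec_build_suffix (children : List Int) (out : List Int) : Prop := out = build_suffix_alt children
instance (children : List Int) (out : List Int) : Decidable (Spec_build_suffix children out) := by unfold Spec_build_suffix; infer_instance

-- ===== CLAIM (what is proved, stated in full; the proofs are below) =====
def Claim_equal_build_suffix : Prop := ∀ (children : List Int), Dom_build_suffix children → Spec_build_suffix children (build_suffix children)

-- ===== LEMMAS AND PROOFS =====

theorem pvRun_add (xs : List Int) (c : Int) : pvRun c xs = c + pvRun 0 xs := by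
  induction xs generalizing c with
  | nil => simp [pvRun]
  | cons a t ih =>
    cases t with
    | nil => simp [pvRun]
    | cons b r =>
      by_cases hab : a ≥ b
      · by_cases h2 : a > b
        · simp only [pvRun, if_pos hab, if_pos h2]
          rw [ih, ih (0 + 1)]; ring
        · simp only [pvRun, if_pos hab, if_neg h2]
          rw [ih]
      · simp [pvRun, hab]

-- A's three branches compute pvRun of the suffix at m from pvRun of the suffix at m+1
theorem pvRun_drop_step (children : List Int) (m : Nat) (hm : m + 1 < children.length) :
    pvRun 0 (children.drop m) =
      if children[m] > children[m + 1] then pvRun 0 (children.drop (m + 1)) + 1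
      else if children[m] = children[m + 1] then pvRun 0 (children.drop (m + 1))
      else 0 := by
  have h1 : children.drop m = children[m] :: children.drop (m + 1) :=
    List.drop_eq_getElem_cons (by omega)
  have h2 : children.drop (m + 1) = children[m + 1] :: children.drop (m + 2) :=
    List.drop_eq_getElem_cons (by omega)
  rw [h1, h2]
  by_cases hgt : children[m] > children[m + 1]
  · simp only [pvRun, if_pos (le_of_lt hgt), if_pos hgt, zero_add]
    rw [pvRun_add]; ring
  · by_cases heq : children[m] = children[m + 1]
    · simp only [pvRun, heq, le_refl, if_pos, lt_irrefl]
      simp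
    · have hlt : ¬ children[m] ≥ children[m + 1] := by omega
      simp [pvRun, hlt, hgt, heq]

-- the loop invariant: after the countdown has still to process k-1 … 0, the state holds
-- the final value at every position ≥ k and 0 below; running the rest finishes the job
theorem loopA (children : List Int) (k : Nat) (hk : k < children.length) :
    (PySem.List.pyRange ((k : Int) - 1) (-1) (-1)).foldl (fun s i =>
      if PySem.List.pyGetD children i 0 > PySem.List.pyGetD children (i + 1) 0 then
        s.set i.toNat (PySem.List.pyGetD s (i + 1) 0 + 1)
      else if PySem.List.pyGetD children i 0 = PySem.List.pyGetD children (i + 1) 0 then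
        s.set i.toNat (PySem.List.pyGetD s (i + 1) 0)
      else s)
      ((List.range children.length).map
        (fun j => if k ≤ j then pvRun 0 (children.drop j) else 0)) =
    (List.range children.length).map (fun j => pvRun 0 (children.drop j)) := by
  induction k with
  | zero =>
    rw [PySem.List.pyRange_neg_one_eq_nil (by omega)]
    simp
  | succ m ih =>
    have hm : m + 1 < children.length := hk
    have hrange : PySem.List.pyRange (((m + 1 : Nat) : Int) - 1) (-1) (-1)
        = (m : Int) :: PySem.List.pyRange ((m : Int) - 1) (-1) (-1) := by
      push_cast
      rw [show ((m : Int) + 1 - 1) = (m : Int) by ring]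
      exact PySem.List.pyRange_neg_one_cons (by omega)
    rw [hrange]
    simp only [List.foldl_cons]
    have hstep :
        (if PySem.List.pyGetD children (m : Int) 0 > PySem.List.pyGetD children ((m : Int) + 1) 0 then
          ((List.range children.length).map
            (fun j => if m + 1 ≤ j then pvRun 0 (children.drop j) else 0)).set (m : Int).toNat
            (PySem.List.pyGetD ((List.range children.length).map
              (fun j => if m + 1 ≤ j then pvRun 0 (children.drop j) else 0)) ((m : Int) + 1) 0 + 1)
        else if PySem.List.pyGetD children (m : Int) 0 = PySem.List.pyGetD children ((m : Int) + 1) 0 then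
          ((List.range children.length).map
            (fun j => if m + 1 ≤ j then pvRun 0 (children.drop j) else 0)).set (m : Int).toNat
            (PySem.List.pyGetD ((List.range children.length).map
              (fun j => if m + 1 ≤ j then pvRun 0 (children.drop j) else 0)) ((m : Int) + 1) 0)
        else ((List.range children.length).map
          (fun j => if m + 1 ≤ j then pvRun 0 (children.drop j) else 0)))
        = (List.range children.length).map
            (fun j => if m ≤ j then pvRun 0 (children.drop j) else 0) := by
      have hci : PySem.List.pyGetD children (m : Int) 0 = children[m] := by
        rw [PySem.List.pyGetD_natCast]
        simp [List.getD, List.getElem?_eq_getElem (by omega : m < children.length)]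
      have hci1 : PySem.List.pyGetD children ((m : Int) + 1) 0 = children[m + 1] := by
        rw [show ((m : Int) + 1) = ((m + 1 : Nat) : Int) by push_cast; ring,
          PySem.List.pyGetD_natCast]
        simp [List.getD, List.getElem?_eq_getElem hm]
      have hsi1 : PySem.List.pyGetD ((List.range children.length).map
            (fun j => if m + 1 ≤ j then pvRun 0 (children.drop j) else 0)) ((m : Int) + 1) 0
          = pvRun 0 (children.drop (m + 1)) := by
        rw [show ((m : Int) + 1) = ((m + 1 : Nat) : Int) by push_cast; ring,
          PySem.List.pyGetD_natCast]
        simp [List.getD, hm]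
      have htom : ((m : Int)).toNat = m := by omega
      rw [hci, hci1, hsi1, htom]
      have hval := pvRun_drop_step children m hm
      apply List.ext_getElem
      · split_ifs <;> simp
      · intro j hj1 hj2
        simp only [List.length_map, List.length_range] at hj1 hj2 ⊢
        by_cases hjm : j = m
        · subst hjm
          split_ifs with h1 h2 <;>
            simp_all [List.getElem_map, List.getElem_range]
        · have hms : ¬ m = j := fun h => hjm h.symm
          have hiff : m < j ↔ m ≤ j := by omega
          split_ifs with h1 h2 <;>
            simp [hms, hiff]
    rw [hstep]
    exact ih (by omega)

-- the initial all-zero array is the k = n-1 instance of the invariant state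
theorem init_eq (children : List Int) (h1 : 1 ≤ children.length) :
    List.replicate children.length (0 : Int) =
      (List.range children.length).map
        (fun j => if children.length - 1 ≤ j then pvRun 0 (children.drop j) else 0) := by
  apply List.ext_getElem
  · simp
  · intro j hj1 hj2
    simp only [List.length_replicate] at hj1
    simp only [List.getElem_replicate, List.getElem_map, List.getElem_range]
    split_ifs with h
    · have hj : j = children.length - 1 := by omega
      subst hj
      have hnil : children.drop (children.length - 1 + 1) = [] :=
        List.drop_eq_nil_iff.mpr (by omega)
      rw [List.drop_eq_getElem_cons (by omega : children.length - 1 < children.length), hnil]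
      simp [pvRun]
    · rfl

theorem alt_eq_map (children : List Int) :
    build_suffix_alt children =
      (List.range children.length).map (fun j => pvRun 0 (children.drop j)) := by
  unfold build_suffix_alt
  rw [PySem.List.pyRange_zero_natCast, List.map_map]
  apply List.map_congr_left
  intro j _
  simp [PySem.List.slice_from_natCast]

-- ===== VERDICT (by name: the statement is the Claim_ definition above) =====
theorem build_suffix_spec : Claim_equal_build_suffix := by
  intro children _
  show build_suffix children = build_suffix_alt children
  unfold build_suffix
  rw [alt_eq_map]
  by_cases h0 : children.length = 0
  · rw [PySem.List.pyRange_neg_one_eq_nil (by omega)]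
    simp [h0]
  · have h1 : 1 ≤ children.length := by omega
    have hcast : (children.length : Int) - 2 = ((children.length - 1 : Nat) : Int) - 1 := by
      omega
    rw [hcast, init_eq children h1]
    exact loopA children (children.length - 1) (by omega)
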